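-- pv_equiv track=rewrite | github.com/yuyaxiong/interveiw_algorithm | LeetCode/差分数组/370.py | zoneAdd
-- ===== SOURCE A (Python) =====
-- from typing import List
--
-- def zoneAdd(updates: List[List[int]], length: int) -> int:
--     # max_val = max([item[1] for item in updates])
--     delta_list = [0 for _ in range(length)]
--     for item in updates:
--         start, end , inc = item[0], item[1], item[2]
--         delta_list[start] += inc
--         if end + 1 < len(delta_list):
--             delta_list[end+1] -= inc
--     res_list = []
--     for delta in delta_list:
--         val = res_list[-1] + delta if len(res_list) > 0 else delta
--         res_list.append(val)
--     return res_list
-- ===== SOURCE B (Python) =====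
-- from typing import List
--
-- def zoneAdd(updates: List[List[int]], length: int) -> List[int]:
--     result = [0] * length
--     for item in updates:
--         start, end, inc = item[0], item[1], item[2]
--         for i in range(start, min(end + 1, length)):
--             result[i] += inc
--     return result
-- ===== Notes on version B (the rewrite author's own statement) =====
-- stated objective: simpler
-- what changed: Replaces the difference-array build plus prefix-sum pass with a direct nested loop that adds each update's increment over its clamped index range of a zero-filled result.
-- outside the precondition, e.g. on zoneAdd([[-1, 1, 5]], 3): A returns [0, 0, 0], B returns [5, 5, 5]; on zoneAdd([[2, 0, 4]], 3): A returns [0, -4, 0], B returns [0, 0, 0]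
import Mathlib
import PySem

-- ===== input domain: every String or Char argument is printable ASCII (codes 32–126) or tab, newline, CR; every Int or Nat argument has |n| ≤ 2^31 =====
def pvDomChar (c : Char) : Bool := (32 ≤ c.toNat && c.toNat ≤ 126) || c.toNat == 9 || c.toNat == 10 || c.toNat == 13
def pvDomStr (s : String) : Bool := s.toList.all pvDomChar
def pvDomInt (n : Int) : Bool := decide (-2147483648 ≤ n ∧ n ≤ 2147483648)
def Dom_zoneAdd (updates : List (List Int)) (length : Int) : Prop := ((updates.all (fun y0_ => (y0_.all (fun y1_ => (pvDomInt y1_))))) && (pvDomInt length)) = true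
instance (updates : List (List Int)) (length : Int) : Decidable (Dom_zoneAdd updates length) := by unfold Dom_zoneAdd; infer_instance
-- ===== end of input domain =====

-- B replaces A's difference-array + prefix-sum strategy by a direct nested loop that adds each
-- update's increment over its clamped index range (objective: simpler; no speed claim).

-- ===== PORT A =====
-- `xs[i] += v` (a statement both Python versions contain literally)
def pyAddAt (xs : List Int) (i v : Int) : List Int :=
  PySem.List.pySetD xs i (PySem.List.pyGetD xs i 0 + v)

def zoneAdd (updates : List (List Int)) (length : Int) : List Int :=
  let delta :=
    updates.foldl
      (fun dl item =>
        let s := PySem.List.pyGetD item 0 0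
        let e := PySem.List.pyGetD item 1 0
        let inc := PySem.List.pyGetD item 2 0
        let dl := pyAddAt dl s inc
        if e + 1 < (dl.length : Int) then pyAddAt dl (e + 1) (-inc) else dl)
      ((PySem.List.pyRange 0 length 1).map (fun _ => (0 : Int)))
  delta.foldl
    (fun r d => r ++ [if 0 < r.length then PySem.List.pyGetD r (-1) 0 + d else d]) []

-- ===== PORT B =====
def zoneAdd_alt (updates : List (List Int)) (length : Int) : List Int :=
  updates.foldl
    (fun result item =>
      let s := PySem.List.pyGetD item 0 0
      let e := PySem.List.pyGetD item 1 0
      let inc := PySem.List.pyGetD item 2 0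
      (PySem.List.pyRange s (min (e + 1) length) 1).foldl
        (fun result i => pyAddAt result i inc) result)
    (List.replicate length.toNat 0)

-- ===== PRECONDITION & SPEC =====
-- Pre_ restricts to the natural domain of these range updates (each update a full triple with
-- 0 ≤ start < length and start ≤ end + 1); outside it A either raises IndexError or returns an
-- accidental value via Python negative-index wraparound / a reversed-range difference array,
-- while B does the plain-range thing.
def Pre_zoneAdd (updates : List (List Int)) (length : Int) : Prop :=
  ∀ item ∈ updates, 3 ≤ item.length ∧ 0 ≤ item.getD 0 0 ∧ item.getD 0 0 < length ∧
    item.getD 0 0 ≤ item.getD 1 0 + 1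
instance (updates : List (List Int)) (length : Int) : Decidable (Pre_zoneAdd updates length) := by
  unfold Pre_zoneAdd; infer_instance

def pvWitness_zoneAdd : List (List Int) × Int := ([[1, 2, 5], [0, 0, 2]], 4)

def Spec_zoneAdd (updates : List (List Int)) (length : Int) (out : List Int) : Prop := out = zoneAdd_alt updates length
instance (updates : List (List Int)) (length : Int) (out : List Int) : Decidable (Spec_zoneAdd updates length out) := by unfold Spec_zoneAdd; infer_instance

-- ===== CLAIM (what is proved, stated in full; the proofs are below) =====
def Claim_equal_zoneAdd : Prop := ∀ (updates : List (List Int)) (length : Int), Dom_zoneAdd updates length → Pre_zoneAdd updates length → Spec_zoneAdd updates length (zoneAdd updates length)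

-- ===== LEMMAS AND PROOFS =====

-- the prefix-sum list of A's second loop: SP xs [i] = sum of xs[0..i]
def SP (xs : List Int) : List Int :=
  (List.range xs.length).map (fun i => ((xs.take (i + 1)).sum))

-- let-free (definitionally equal) forms of the two loop bodies
def stepA (dl item : List Int) : List Int :=
  if PySem.List.pyGetD item 1 0 + 1
      < ((pyAddAt dl (PySem.List.pyGetD item 0 0) (PySem.List.pyGetD item 2 0)).length : Int)
  then pyAddAt (pyAddAt dl (PySem.List.pyGetD item 0 0) (PySem.List.pyGetD item 2 0))
        (PySem.List.pyGetD item 1 0 + 1) (-(PySem.List.pyGetD item 2 0))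
  else pyAddAt dl (PySem.List.pyGetD item 0 0) (PySem.List.pyGetD item 2 0)

def stepB (length : Int) (result item : List Int) : List Int :=
  (PySem.List.pyRange (PySem.List.pyGetD item 0 0)
      (min (PySem.List.pyGetD item 1 0 + 1) length) 1).foldl
    (fun result i => pyAddAt result i (PySem.List.pyGetD item 2 0)) result

lemma SP_length (xs : List Int) : (SP xs).length = xs.length := by
  simp [SP]

lemma SP_getElem (xs : List Int) (j : Nat) (hj : j < xs.length) :
    (SP xs)[j]'(by simpa [SP_length] using hj) = (xs.take (j + 1)).sum := by
  simp [SP]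

lemma SP_replicate (n : Nat) : SP (List.replicate n 0) = List.replicate n (0 : Int) := by
  apply List.ext_getElem <;> simp [SP, List.take_replicate, List.sum_replicate]

lemma psum_eq (xs : List Int) :
    xs.foldl (fun r d => r ++ [if 0 < r.length then PySem.List.pyGetD r (-1) 0 + d else d]) []
      = SP xs := by
  induction xs using List.reverseRecOn with
  | nil => simp [SP]
  | append_singleton xs x ih =>
      rw [List.foldl_append, List.foldl_cons, List.foldl_nil, ih]
      rcases eq_or_ne xs [] with h | h
      · subst h; simp [SP]
      · have hlen : 0 < xs.length := List.length_pos_iff.mpr h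
        have hne : SP xs ≠ [] := by
          rw [← List.length_pos_iff, SP_length]; exact hlen
        have hlast : PySem.List.pyGetD (SP xs) (-1) 0 = xs.sum := by
          rw [PySem.List.pyGetD_neg_one _ _ hne, List.getLast_eq_getElem]
          simp only [SP_length]
          rw [SP_getElem xs (xs.length - 1) (by omega), Nat.sub_add_cancel hlen,
            List.take_length]
        rw [if_pos (by rw [SP_length]; exact hlen), hlast]
        -- SP xs ++ [xs.sum + x] = SP (xs ++ [x])
        unfold SP
        simp only [List.length_append, List.length_cons, List.length_nil, Nat.zero_add]
        rw [List.range_succ, List.map_append, List.map_singleton]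
        congr 1
        · exact List.map_congr_left fun i hi => by
            rw [List.take_append_of_le_length (by simp at hi; omega)]
        · rw [List.take_of_length_le (by simp)]
          simp

lemma length_pyAddAt (xs : List Int) (i v : Int) : (pyAddAt xs i v).length = xs.length := by
  simp [pyAddAt, PySem.List.length_pySetD]

lemma pyAddAt_of_nonneg (xs : List Int) (i v : Int) (h0 : 0 ≤ i) (h : i < (xs.length : Int)) :
    pyAddAt xs i v = xs.set i.toNat (xs[i.toNat]'(by omega) + v) := by
  rw [pyAddAt, PySem.List.pySetD_of_nonneg _ _ h0,
    PySem.List.pyGetD_eq_getElem _ _ h0 h]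

lemma length_stepA (dl item : List Int) : (stepA dl item).length = dl.length := by
  unfold stepA
  split <;> simp [length_pyAddAt]

lemma sum_take_set (l : List Int) (n k : Nat) (v : Int) (h : n < l.length) :
    ((l.set n (l[n] + v)).take k).sum = (l.take k).sum + if n < k then v else 0 := by
  by_cases hk : n < k
  · rw [List.take_set, List.sum_set]
    have hlt : n < (l.take k).length := by simp [List.length_take]; omega
    have hdec : (l.take k).sum
        = (List.take n (l.take k)).sum + (l[n] + (List.drop (n + 1) (l.take k)).sum) := by
      conv_lhs => rw [← List.take_append_drop n (l.take k)]
      rw [List.sum_append, ← List.getElem_cons_drop hlt, List.sum_cons, List.getElem_take]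
    rw [if_pos hlt, if_pos hk, hdec]; ring
  · rw [List.take_set, List.set_eq_of_length_le (by simp [List.length_take]; omega),
      if_neg hk, add_zero]

lemma rangeAdd_length (inc : Int) : ∀ (n : Nat) (a b : Int) (r : List Int),
    (b - a).toNat = n → 0 ≤ a → b ≤ (r.length : Int) →
    ((PySem.List.pyRange a b 1).foldl (fun result i => pyAddAt result i inc) r).length
      = r.length := by
  intro n
  induction n with
  | zero =>
      intro a b r h _ _
      rw [PySem.List.pyRange_one_eq_nil (by omega)]; rfl
  | succ n ih =>
      intro a b r h h0 hb
      rw [PySem.List.pyRange_one_cons (by omega), List.foldl_cons,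
        ih (a + 1) b _ (by omega) (by omega) (by rw [length_pyAddAt]; exact hb),
        length_pyAddAt]

lemma rangeAdd_getElem (inc : Int) : ∀ (n : Nat) (a b : Int) (r : List Int)
    (h : (b - a).toNat = n) (h0 : 0 ≤ a) (hb : b ≤ (r.length : Int)) (j : Nat)
    (hj : j < r.length),
    ((PySem.List.pyRange a b 1).foldl (fun result i => pyAddAt result i inc) r)[j]'
        (by rw [rangeAdd_length inc n a b r h h0 hb]; exact hj)
      = r[j] + if a ≤ (j : Int) ∧ (j : Int) < b then inc else 0 := by
  intro n
  induction n with
  | zero =>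
      intro a b r h h0 hb j hj
      simp only [PySem.List.pyRange_one_eq_nil (show b ≤ a by omega), List.foldl_nil]
      rw [if_neg (by omega), add_zero]
  | succ n ih =>
      intro a b r h h0 hb j hj
      have hab : a < b := by omega
      have ha' : a < (r.length : Int) := by omega
      simp only [PySem.List.pyRange_one_cons hab, List.foldl_cons,
        pyAddAt_of_nonneg r a inc h0 ha']
      rw [ih (a + 1) b _ (by omega) (by omega) (by simpa using hb) j (by simpa using hj),
        List.getElem_set]
      have hcast : ((a.toNat : Int)) = a := Int.toNat_of_nonneg h0
      by_cases hja : a.toNat = j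
      · rw [if_pos hja, if_neg (by omega), if_pos ⟨by omega, by omega⟩, add_zero]
        subst hja
        rfl
      · rw [if_neg hja]
        by_cases h2 : a + 1 ≤ (j : Int) ∧ (j : Int) < b
        · rw [if_pos h2, if_pos ⟨by omega, h2.2⟩]
        · rw [if_neg h2, if_neg (by intro hc; exact h2 ⟨by omega, hc.2⟩)]

lemma step_bridge (length : Int) (d item : List Int) (hd : d.length = length.toNat)
    (hs0 : 0 ≤ item.getD 0 0) (hsl : item.getD 0 0 < length)
    (hse : item.getD 0 0 ≤ item.getD 1 0 + 1) :
    stepB length (SP d) item = SP (stepA d item) := by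
  unfold stepA stepB
  rw [PySem.List.pyGetD_ofNat' item 0 0, PySem.List.pyGetD_ofNat' item 1 0,
    PySem.List.pyGetD_ofNat' item 2 0]
  generalize hgs : item.getD 0 0 = s at hs0 hsl hse ⊢
  generalize hge : item.getD 1 0 = e at hse ⊢
  generalize hgi : item.getD 2 0 = inc at ⊢
  have hlen0 : 0 < length := by omega
  have hL : ((length.toNat : Int)) = length := Int.toNat_of_nonneg (by omega)
  have hdL : (d.length : Int) = length := by rw [hd]; exact hL
  have hslen : s < (d.length : Int) := by omega
  have hn : ((s.toNat : Int)) = s := Int.toNat_of_nonneg hs0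
  rw [pyAddAt_of_nonneg d s inc hs0 hslen]
  have hd1len : (d.set s.toNat (d[s.toNat]'(by omega) + inc)).length = d.length :=
    List.length_set ..
  by_cases hcase : e + 1 < length
  · rw [if_pos (by rw [hd1len]; omega)]
    have hm : (((e + 1).toNat : Int)) = e + 1 := Int.toNat_of_nonneg (by omega)
    rw [min_eq_left (show e + 1 ≤ length by omega)]
    rw [pyAddAt_of_nonneg _ (e + 1) (-inc) (by omega) (by rw [hd1len]; omega)]
    apply List.ext_getElem
    · rw [rangeAdd_length inc _ s (e + 1) (SP d) rfl hs0
        (by rw [SP_length]; omega), SP_length, SP_length]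
      simp [hd1len]
    · intro j hj hj2
      have hjd : j < d.length := by
        rw [rangeAdd_length inc _ s (e + 1) (SP d) rfl hs0
          (by rw [SP_length]; omega), SP_length] at hj
        exact hj
      rw [rangeAdd_getElem inc _ s (e + 1) (SP d) rfl hs0
        (by rw [SP_length]; omega) j (by rw [SP_length]; exact hjd)]
      rw [SP_getElem _ j hjd]
      rw [SP_getElem _ j (by simpa [hd1len] using hjd)]
      rw [show ((d.set s.toNat (d[s.toNat]'(by omega) + inc))[(e + 1).toNat]'(by omega) + -inc)
        = ((d.set s.toNat (d[s.toNat]'(by omega) + inc))[(e + 1).toNat]'(by omega) + (-inc)) from rfl]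
      rw [sum_take_set _ _ _ (-inc) (by omega), sum_take_set d _ _ inc (by omega)]
      have hjc : (j : Int) < length := by omega
      split_ifs <;> first | ring1 | (exfalso; omega)
  · rw [if_neg (by rw [hd1len]; omega)]
    rw [min_eq_right (show length ≤ e + 1 by omega)]
    apply List.ext_getElem
    · rw [rangeAdd_length inc _ s length (SP d) rfl hs0
        (by rw [SP_length]; omega), SP_length, SP_length, hd1len]
    · intro j hj hj2
      have hjd : j < d.length := by
        rw [rangeAdd_length inc _ s length (SP d) rfl hs0
          (by rw [SP_length]; omega), SP_length] at hj
        exact hj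
      rw [rangeAdd_getElem inc _ s length (SP d) rfl hs0
        (by rw [SP_length]; omega) j (by rw [SP_length]; exact hjd)]
      rw [SP_getElem _ j hjd]
      rw [SP_getElem _ j (by simpa [hd1len] using hjd)]
      rw [sum_take_set d _ _ inc (by omega)]
      have hjc : (j : Int) < length := by omega
      split_ifs <;> first | ring1 | (exfalso; omega)

lemma main_inv (length : Int) : ∀ (us : List (List Int)) (d : List Int),
    (∀ item ∈ us, 3 ≤ item.length ∧ 0 ≤ item.getD 0 0 ∧ item.getD 0 0 < length ∧
      item.getD 0 0 ≤ item.getD 1 0 + 1) →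
    d.length = length.toNat →
    us.foldl (stepB length) (SP d) = SP (us.foldl stepA d) := by
  intro us
  induction us with
  | nil => intro d _ _; simp
  | cons i us ih =>
      intro d hpre hd
      have hi := hpre i (by simp)
      rw [List.foldl_cons, List.foldl_cons,
        step_bridge length d i hd hi.2.1 hi.2.2.1 hi.2.2.2]
      exact ih (stepA d i) (fun it hit => hpre it (by simp [hit]))
        (by rw [length_stepA]; exact hd)

lemma delta0_eq (length : Int) :
    (PySem.List.pyRange 0 length 1).map (fun _ => (0 : Int))
      = List.replicate length.toNat 0 := by
  rw [List.map_const']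
  simp [PySem.List.length_pyRange_one]

-- ===== VERDICT (by name: the statement is the Claim_ definition above) =====
theorem zoneAdd_spec : Claim_equal_zoneAdd := by
  intro updates length _ hpre
  show zoneAdd updates length = zoneAdd_alt updates length
  have hA : zoneAdd updates length
      = (updates.foldl stepA ((PySem.List.pyRange 0 length 1).map (fun _ => (0 : Int)))).foldl
          (fun r d => r ++ [if 0 < r.length then PySem.List.pyGetD r (-1) 0 + d else d]) [] := rfl
  have hB : zoneAdd_alt updates length
      = updates.foldl (stepB length) (List.replicate length.toNat 0) := rfl
  rw [hA, psum_eq, delta0_eq, hB]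
  have hmain := main_inv length updates (List.replicate length.toNat 0) hpre (by simp)
  rw [SP_replicate] at hmain
  exact hmain.symm
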